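-- pv_equiv track=rewrite | github.com/ef-pa/CTF_Playbook | ctf_playbook/services/builder.py | _merge_tools
-- ===== SOURCE A (Python) =====
-- def _merge_tools(raw_tools: dict[str, int]) -> dict[str, int]:
--     """Merge tool name variants by case-insensitive normalization."""
--     groups: dict[str, dict] = {}  # lowered -> {canonical, count}
--     for tool, count in raw_tools.items():
--         key = tool.strip().lower()
--         if key in groups:
--             groups[key]["count"] += count
--             # Keep the form with higher count as canonical
--             if count > groups[key]["best_count"]:
--                 groups[key]["canonical"] = tool
--                 groups[key]["best_count"] = count
--         else:
--             groups[key] = {"canonical": tool, "count": count, "best_count": count}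
--     return {info["canonical"]: info["count"] for info in groups.values()}
-- ===== SOURCE B (Python) =====
-- def _merge_tools(raw_tools: dict[str, int]) -> dict[str, int]:
--     """Merge tool name variants by case-insensitive normalization."""
--     groups: dict[str, list] = {}  # lowered -> list of (tool, count) in encounter order
--     for tool, count in raw_tools.items():
--         groups.setdefault(tool.strip().lower(), []).append((tool, count))
--     return {
--         max(items, key=lambda tc: tc[1])[0]: sum(c for _, c in items)
--         for items in groups.values()
--     }
-- ===== Notes on version B (the rewrite author's own statement) =====
-- stated objective: simpler
-- what changed: B replaces A's per-key running record {canonical,count,best_count} maintained across the loop by a one-pass grouping of (tool,count) pairs per lowered key followed by a dict comprehension using max (first maximal, matching A's strict tie-break) and sum.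
import Mathlib
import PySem

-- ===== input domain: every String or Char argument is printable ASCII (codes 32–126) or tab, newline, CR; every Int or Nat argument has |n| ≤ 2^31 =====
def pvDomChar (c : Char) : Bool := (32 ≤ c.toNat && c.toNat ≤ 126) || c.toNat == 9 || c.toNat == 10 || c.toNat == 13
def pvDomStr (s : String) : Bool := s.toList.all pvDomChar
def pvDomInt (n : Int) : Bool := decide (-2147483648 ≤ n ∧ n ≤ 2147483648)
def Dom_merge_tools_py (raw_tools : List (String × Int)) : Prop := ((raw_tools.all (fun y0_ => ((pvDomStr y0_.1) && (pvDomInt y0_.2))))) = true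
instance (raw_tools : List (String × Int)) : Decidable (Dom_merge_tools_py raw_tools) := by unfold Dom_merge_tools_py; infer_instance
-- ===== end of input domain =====

-- B groups the (tool, count) pairs per lowered key in one pass and derives canonical/count
-- with max/sum in a final comprehension, instead of A's running per-key record; objective: simpler.

-- ===== PORT A =====
def keyOf (tool : String) : String := PySem.Str.lower (PySem.Str.strip tool)

def mergeStepA (groups : PySem.Dict String (String × Int × Int)) (p : String × Int) :
    PySem.Dict String (String × Int × Int) :=
  match groups.get? (keyOf p.1) with
  | some info =>
      -- count += ; then if count > best_count replace canonical and best_count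
      if p.2 > info.2.2 then groups.insert (keyOf p.1) (p.1, info.2.1 + p.2, p.2)
      else groups.insert (keyOf p.1) (info.1, info.2.1 + p.2, info.2.2)
  | none => groups.insert (keyOf p.1) (p.1, p.2, p.2)

def merge_tools_py (raw_tools : List (String × Int)) : List (String × Int) :=
  ((raw_tools.foldl mergeStepA PySem.Dict.empty).values.foldl
    (fun d info => d.insert info.1 info.2.1) PySem.Dict.empty).items

-- ===== PORT B =====
def mergeStepB (groups : PySem.Dict String (List (String × Int))) (p : String × Int) :
    PySem.Dict String (List (String × Int)) :=
  groups.modify (keyOf p.1) [] (fun items => items ++ [p])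

def merge_tools_py_alt (raw_tools : List (String × Int)) : List (String × Int) :=
  ((raw_tools.foldl mergeStepB PySem.Dict.empty).values.foldl (fun d items =>
      d.insert (((PySem.List.max? items (fun tc => tc.2)).map (fun tc => tc.1)).getD "")
        ((items.map (fun tc => tc.2)).sum)) PySem.Dict.empty).items

-- ===== PRECONDITION & SPEC =====
def Spec_merge_tools_py (raw_tools : List (String × Int)) (out : List (String × Int)) : Prop := out = merge_tools_py_alt raw_tools
instance (raw_tools : List (String × Int)) (out : List (String × Int)) : Decidable (Spec_merge_tools_py raw_tools out) := by unfold Spec_merge_tools_py; infer_instance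

-- ===== CLAIM (what is proved, stated in full; the proofs are below) =====
def Claim_equal_merge_tools_py : Prop := ∀ (raw_tools : List (String × Int)), Dom_merge_tools_py raw_tools → Spec_merge_tools_py raw_tools (merge_tools_py raw_tools)

-- ===== LEMMAS AND PROOFS =====

-- agg items = the (canonical, count, best_count) record A maintains for the group 'items'
def aggT (s : String × Int × Int) (q : String × Int) : String × Int × Int :=
  if s.2.2 < q.2 then (q.1, s.2.1 + q.2, q.2) else (s.1, s.2.1 + q.2, s.2.2)

def agg : List (String × Int) → String × Int × Int
  | [] => ("", 0, 0)
  | p :: t => t.foldl aggT (p.1, p.2, p.2)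

def pstep (m q : String × Int) : String × Int := if m.2 < q.2 then q else m

def mapAgg (l : List (String × List (String × Int))) : List (String × (String × Int × Int)) :=
  l.map (fun kv => (kv.1, agg kv.2))

theorem get?_mapAgg (l : List (String × List (String × Int))) (k : String) :
    (PySem.Dict.mk (mapAgg l)).get? k = ((PySem.Dict.mk l).get? k).map agg := by
  induction l with
  | nil => simp [mapAgg, PySem.Dict.get?]
  | cons kv t ih =>
    simp only [mapAgg, List.map_cons] at *
    rw [PySem.Dict.get?_mk_cons, PySem.Dict.get?_mk_cons]
    by_cases h : kv.1 == k
    · simp [h]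
    · simp only [h, Bool.false_eq_true] at *
      simpa using ih

theorem contains_mapAgg (l : List (String × List (String × Int))) (k : String) :
    (PySem.Dict.mk (mapAgg l)).contains k = (PySem.Dict.mk l).contains k := by
  rw [PySem.Dict.contains_eq_isSome_get?, PySem.Dict.contains_eq_isSome_get?, get?_mapAgg]
  cases (PySem.Dict.mk l).get? k <;> rfl

theorem agg_append_singleton (p : String × Int) (t : List (String × Int)) (q : String × Int) :
    agg (p :: (t ++ [q])) = aggT (agg (p :: t)) q := by
  simp [agg, List.foldl_append]

theorem step_eq (gB : PySem.Dict String (List (String × Int))) (p : String × Int)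
    (hnd : gB.keys.Nodup) (hne : ∀ kv ∈ gB.items, kv.2 ≠ []) :
    mergeStepA (PySem.Dict.mk (mapAgg gB.items)) p = PySem.Dict.mk (mapAgg (mergeStepB gB p).items) := by
  unfold mergeStepA mergeStepB
  cases hget : gB.get? (keyOf p.1) with
  | none =>
    have hA : (PySem.Dict.mk (mapAgg gB.items)).get? (keyOf p.1) = none := by
      rw [get?_mapAgg]
      · show (gB.get? (keyOf p.1)).map agg = none
        rw [hget]; rfl
    rw [hA]
    have hc : gB.contains (keyOf p.1) = false := by
      rw [PySem.Dict.get?_eq_none_iff_contains] at hget; exact hget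
    have hcA : (PySem.Dict.mk (mapAgg gB.items)).contains (keyOf p.1) = false := by
      rw [contains_mapAgg]; exact hc
    have hmod : gB.modify (keyOf p.1) [] (fun items => items ++ [p]) = gB.insert (keyOf p.1) [p] := by
      unfold PySem.Dict.modify
      rw [PySem.Dict.getD_of_get?_eq_none gB [] hget]
      simp
    rw [hmod]
    apply PySem.Dict.ext
    rw [PySem.Dict.items_insert_of_not_contains _ _ hcA]
    show _ = mapAgg ((gB.insert (keyOf p.1) [p]).items)
    rw [PySem.Dict.items_insert_of_not_contains _ _ hc]
    simp [mapAgg, agg]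
  | some items0 =>
    have hmem := PySem.Dict.mem_items_of_get?_eq_some gB hget
    have hne0 : items0 ≠ [] := hne _ hmem
    have hA : (PySem.Dict.mk (mapAgg gB.items)).get? (keyOf p.1) = some (agg items0) := by
      rw [get?_mapAgg]
      show (gB.get? (keyOf p.1)).map agg = _
      rw [hget]; rfl
    simp only [hA]
    have hc : gB.contains (keyOf p.1) = true := by
      rw [PySem.Dict.contains_eq_isSome_get?, hget]; rfl
    have hcA : (PySem.Dict.mk (mapAgg gB.items)).contains (keyOf p.1) = true := by
      rw [contains_mapAgg]; exact hc
    have hmod : gB.modify (keyOf p.1) [] (fun items => items ++ [p])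
        = gB.insert (keyOf p.1) (items0 ++ [p]) := by
      unfold PySem.Dict.modify
      rw [PySem.Dict.getD_of_get?_eq_some gB [] hget]
    rw [hmod]
    -- both sides insert at an existing key
    have key_items : ∀ q ∈ gB.items, q.1 = keyOf p.1 → q.2 = items0 := by
      intro q hq hk
      have := PySem.Dict.get?_of_mem_items gB (k := q.1) (v := q.2) (by simpa using hq) hnd
      rw [hk, hget] at this
      exact (Option.some.injEq _ _ ▸ this).symm
    have goal_items :
        mapAgg (List.map (fun q => if (q.1 == keyOf p.1) = true then (keyOf p.1, items0 ++ [p]) else q) gB.items)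
        = List.map (fun q => if (q.1 == keyOf p.1) = true then (keyOf p.1, aggT (agg items0) p) else q)
            (mapAgg gB.items) := by
      unfold mapAgg
      rw [List.map_map, List.map_map]
      apply List.map_congr_left
      intro q hq
      by_cases h : q.1 = keyOf p.1
      · have hb : (q.1 == keyOf p.1) = true := by simp [h]
        have hq2 : q.2 = items0 := key_items q hq h
        simp only [Function.comp, hb, if_pos, hq2]
        obtain ⟨p0, t0, rfl⟩ : ∃ p0 t0, items0 = p0 :: t0 := by
          cases items0 with
          | nil => exact absurd rfl hne0
          | cons a b => exact ⟨a, b, rfl⟩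
        simp [agg_append_singleton]
      · have hb : (q.1 == keyOf p.1) = false := by simp [h]
        simp [Function.comp, hb]
    split_ifs with hcond
    · -- p.2 > best: canonical and best_count are replaced
      apply PySem.Dict.ext
      rw [PySem.Dict.items_insert_of_contains _ _ hcA]
      show _ = mapAgg ((gB.insert (keyOf p.1) (items0 ++ [p])).items)
      rw [PySem.Dict.items_insert_of_contains _ _ hc, goal_items]
      apply List.map_congr_left
      intro q _
      by_cases h : (q.1 == keyOf p.1) = true <;> simp [h, aggT, hcond]
    · apply PySem.Dict.ext
      rw [PySem.Dict.items_insert_of_contains _ _ hcA]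
      show _ = mapAgg ((gB.insert (keyOf p.1) (items0 ++ [p])).items)
      rw [PySem.Dict.items_insert_of_contains _ _ hc, goal_items]
      apply List.map_congr_left
      intro q _
      have hnc : ¬ (agg items0).2.2 < p.2 := hcond
      by_cases h : (q.1 == keyOf p.1) = true <;> simp [h, aggT, hnc]

theorem stepB_nodup (gB : PySem.Dict String (List (String × Int))) (p : String × Int)
    (hnd : gB.keys.Nodup) : (mergeStepB gB p).keys.Nodup := by
  unfold mergeStepB PySem.Dict.modify
  exact PySem.Dict.nodup_keys_insert _ _ _ hnd

theorem stepB_ne (gB : PySem.Dict String (List (String × Int))) (p : String × Int)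
    (hne : ∀ kv ∈ gB.items, kv.2 ≠ []) :
    ∀ kv ∈ (mergeStepB gB p).items, kv.2 ≠ [] := by
  intro kv hkv
  unfold mergeStepB PySem.Dict.modify at hkv
  rw [PySem.Dict.mem_items_insert] at hkv
  rcases hkv with rfl | ⟨h, _⟩
  · simp
  · exact hne _ h

theorem fold_eq (l : List (String × Int)) (gB : PySem.Dict String (List (String × Int)))
    (hnd : gB.keys.Nodup) (hne : ∀ kv ∈ gB.items, kv.2 ≠ []) :
    l.foldl mergeStepA (PySem.Dict.mk (mapAgg gB.items))
      = PySem.Dict.mk (mapAgg ((l.foldl mergeStepB gB).items)) := by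
  induction l generalizing gB with
  | nil => rfl
  | cons p t ih =>
    rw [List.foldl_cons, List.foldl_cons, step_eq gB p hnd hne]
    exact ih (mergeStepB gB p) (stepB_nodup gB p hnd) (stepB_ne gB p hne)

theorem foldB_ne (l : List (String × Int)) (gB : PySem.Dict String (List (String × Int)))
    (hne : ∀ kv ∈ gB.items, kv.2 ≠ []) :
    ∀ kv ∈ (l.foldl mergeStepB gB).items, kv.2 ≠ [] := by
  induction l generalizing gB with
  | nil => exact hne
  | cons p t ih => exact ih (mergeStepB gB p) (stepB_ne gB p hne)

theorem max?_cons_eq (p : String × Int) (t : List (String × Int)) :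
    PySem.List.max? (p :: t) (fun tc => tc.2) = some (t.foldl pstep p) := by
  induction t generalizing p with
  | nil => rfl
  | cons q t ih =>
    have h1 : PySem.List.max? (p :: q :: t) (fun tc => tc.2)
        = PySem.List.max? (pstep p q :: t) (fun tc => tc.2) := by
      simp only [PySem.List.max?, List.foldl_cons]
      unfold pstep
      split_ifs with h <;> simp
    rw [List.foldl_cons, h1, ih]

theorem agg_foldl_split (t : List (String × Int)) (c : String) (s b : Int) :
    t.foldl aggT (c, s, b)
      = ((t.foldl pstep (c, b)).1, s + (t.map (fun tc => tc.2)).sum, (t.foldl pstep (c, b)).2) := by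
  induction t generalizing c s b with
  | nil => simp
  | cons q t ih =>
    rw [List.foldl_cons, List.foldl_cons]
    have ha : aggT (c, s, b) q = if b < q.2 then (q.1, s + q.2, q.2) else (c, s + q.2, b) := by
      unfold aggT; split_ifs <;> rfl
    have hp : pstep (c, b) q = if b < q.2 then q else (c, b) := by
      unfold pstep; split_ifs <;> rfl
    rw [ha, hp]
    by_cases h : b < q.2
    · rw [if_pos h, if_pos h, ih]
      simp [add_assoc]
    · rw [if_neg h, if_neg h, ih]
      simp [add_assoc]

theorem agg_components (p : String × Int) (t : List (String × Int)) :
    agg (p :: t) = ((t.foldl pstep p).1, ((p :: t).map (fun tc => tc.2)).sum, (t.foldl pstep p).2) := by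
  show t.foldl aggT (p.1, p.2, p.2) = _
  rw [agg_foldl_split]
  simp

-- ===== VERDICT (by name: the statement is the Claim_ definition above) =====
theorem merge_tools_py_spec : Claim_equal_merge_tools_py := by
  intro raw_tools _
  unfold Spec_merge_tools_py merge_tools_py merge_tools_py_alt
  have hmain := fold_eq raw_tools PySem.Dict.empty PySem.Dict.nodup_keys_empty (by intro kv h; simp [PySem.Dict.empty] at h)
  have hempty : (PySem.Dict.mk (mapAgg PySem.Dict.empty.items) : PySem.Dict String (String × Int × Int)) = PySem.Dict.empty := rfl
  rw [hempty] at hmain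
  rw [hmain]
  set itemsB := (raw_tools.foldl mergeStepB PySem.Dict.empty).items with hitems
  have hvalsA : (PySem.Dict.mk (mapAgg itemsB)).values = itemsB.map (fun kv => agg kv.2) := by
    show (mapAgg itemsB).map (fun p => p.2) = _
    rw [mapAgg, List.map_map]; rfl
  have hvalsB : (raw_tools.foldl mergeStepB PySem.Dict.empty).values = itemsB.map (fun kv => kv.2) := rfl
  rw [hvalsA, hvalsB, List.foldl_map, List.foldl_map]
  congr 1
  apply PySem.List.foldl_congr_mem
  intro acc kv hkv
  have hne : kv.2 ≠ [] := foldB_ne raw_tools PySem.Dict.empty (by intro kv h; simp [PySem.Dict.empty] at h) kv hkv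
  obtain ⟨p, t, hpt⟩ : ∃ p t, kv.2 = p :: t := by
    cases h : kv.2 with
    | nil => exact absurd h hne
    | cons a b => exact ⟨a, b, rfl⟩
  rw [hpt, agg_components, max?_cons_eq]
  rfl
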